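-- pv_equiv track=rewrite | github.com/hoodiebaba/dy3 | dplus_backend-devServer/cx-ixtool/cxix/tmobile/tmo_ix/tmo_ciq_data.py | get_gfreqgroop_for_bcch
-- ===== SOURCE A (Python) =====
-- def get_gfreqgroop_for_bcch(bcch):
--     gfreqgroup_gfreq = {
--         '1': [128, 129, 130, 131, 132, 133, 134, 135, 136, 137, 138, 139, 140, 141, 142, 143, 144, 145, 146, 147, 148, 149, 150, 151, 152],
--         '2': [512, 513, 514, 515, 516, 517, 518, 519, 520, 521, 522, 523, 524, 525, 526, 527, 528, 529, 530, 531, 532, 533, 534, 535, 536],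
--         '3': [537, 538, 539, 540, 541, 542, 543, 544, 545, 546, 547, 548, 549, 550, 551, 552, 553, 554, 555, 556, 557, 558, 559, 560, 561],
--         '4': [562, 563, 564, 565, 566, 567, 568, 569, 570, 571, 572, 573, 574, 575, 576, 577, 578, 579, 580, 581, 582, 583, 584, 585, 586],
--         '5': [587, 588, 589, 590, 591, 592, 593, 594, 595, 596, 597, 598, 599, 600, 601, 602, 603, 604, 605, 606, 607, 608, 609, 610, 611],
--         '6': [612, 613, 614, 615, 616, 617, 618, 619, 620, 621, 622, 623, 624, 625, 626, 627, 628, 629, 630, 631, 632, 633, 634, 635, 636],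
--         '7': [637, 638, 639, 640, 641, 642, 643, 644, 645, 646, 647, 648, 649, 650, 651, 652, 653, 654, 655, 656, 657, 658, 659, 660, 661],
--         '8': [662, 663, 664, 665, 666, 667, 668, 669, 670, 671, 672, 673, 674, 675, 676, 677, 678, 679, 680, 681, 682, 683, 684, 685, 686],
--         '9': [687, 688, 689, 690, 691, 692, 693, 694, 695, 696, 697, 698, 699, 700, 701, 702, 703, 704, 705, 706, 707, 708, 709, 710, 711],
--         '10': [712, 713, 714, 715, 716, 717, 718, 719, 720, 721, 722, 723, 724, 725, 726, 727, 728, 729, 730, 731, 732, 733, 734, 735, 736],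
--         '11': [737, 738, 739, 740, 741, 742, 743, 744, 745, 746, 747, 748, 749, 750, 751, 752, 753, 754, 755, 756, 757, 758, 759, 760, 761],
--         '12': [762, 763, 764, 765, 766, 767, 768, 769, 770, 771, 772, 773, 774, 775, 776, 777, 778, 779, 780, 781, 782, 783, 784, 785, 786],
--         '13': [787, 788, 789, 790, 791, 792, 793, 794, 795, 796, 797, 798, 799, 800, 801, 802, 803, 804, 805, 806, 807, 808, 809, 810],
--     }
--     ggroup, bcch = None, int(bcch)
--     for key in gfreqgroup_gfreq.keys():
--         if bcch in gfreqgroup_gfreq.get(key): ggroup = str(key)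
--     return ggroup
-- ===== SOURCE B (Python) =====
-- def get_gfreqgroop_for_bcch(bcch):
--     bcch = int(bcch)
--     if 128 <= bcch <= 152:
--         return '1'
--     if 787 <= bcch <= 810:
--         return '13'
--     if 512 <= bcch <= 786:
--         return str((bcch - 512) // 25 + 2)
--     return None
-- ===== Notes on version B (the rewrite author's own statement) =====
-- stated objective: simpler
-- what changed: Replaces the scan over a 338-entry literal frequency table (last match wins) with direct range arithmetic: group '1' for 128-152, '13' for 787-810, str((bcch-512)//25+2) for the contiguous 25-wide blocks 512-786, None otherwise.
import Mathlib
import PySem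

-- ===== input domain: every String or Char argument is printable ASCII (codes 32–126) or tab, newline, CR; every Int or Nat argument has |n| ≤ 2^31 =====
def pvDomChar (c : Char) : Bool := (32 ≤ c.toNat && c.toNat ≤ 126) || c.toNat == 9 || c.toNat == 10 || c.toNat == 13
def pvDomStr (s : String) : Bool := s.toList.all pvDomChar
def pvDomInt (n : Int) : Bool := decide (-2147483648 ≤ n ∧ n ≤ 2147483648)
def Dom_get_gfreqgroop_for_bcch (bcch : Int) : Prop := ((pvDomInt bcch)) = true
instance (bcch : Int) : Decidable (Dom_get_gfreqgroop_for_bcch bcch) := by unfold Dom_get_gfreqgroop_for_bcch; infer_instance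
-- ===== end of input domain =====

-- ===== PORT A =====
-- B replaces A's scan over a 338-entry literal table with closed-form range arithmetic (objective: simpler).
def pvTable : List (String × List Int) :=
  [ ("1", [128, 129, 130, 131, 132, 133, 134, 135, 136, 137, 138, 139, 140, 141, 142, 143, 144, 145, 146, 147, 148, 149, 150, 151, 152]),
    ("2", [512, 513, 514, 515, 516, 517, 518, 519, 520, 521, 522, 523, 524, 525, 526, 527, 528, 529, 530, 531, 532, 533, 534, 535, 536]),
    ("3", [537, 538, 539, 540, 541, 542, 543, 544, 545, 546, 547, 548, 549, 550, 551, 552, 553, 554, 555, 556, 557, 558, 559, 560, 561]),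
    ("4", [562, 563, 564, 565, 566, 567, 568, 569, 570, 571, 572, 573, 574, 575, 576, 577, 578, 579, 580, 581, 582, 583, 584, 585, 586]),
    ("5", [587, 588, 589, 590, 591, 592, 593, 594, 595, 596, 597, 598, 599, 600, 601, 602, 603, 604, 605, 606, 607, 608, 609, 610, 611]),
    ("6", [612, 613, 614, 615, 616, 617, 618, 619, 620, 621, 622, 623, 624, 625, 626, 627, 628, 629, 630, 631, 632, 633, 634, 635, 636]),
    ("7", [637, 638, 639, 640, 641, 642, 643, 644, 645, 646, 647, 648, 649, 650, 651, 652, 653, 654, 655, 656, 657, 658, 659, 660, 661]),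
    ("8", [662, 663, 664, 665, 666, 667, 668, 669, 670, 671, 672, 673, 674, 675, 676, 677, 678, 679, 680, 681, 682, 683, 684, 685, 686]),
    ("9", [687, 688, 689, 690, 691, 692, 693, 694, 695, 696, 697, 698, 699, 700, 701, 702, 703, 704, 705, 706, 707, 708, 709, 710, 711]),
    ("10", [712, 713, 714, 715, 716, 717, 718, 719, 720, 721, 722, 723, 724, 725, 726, 727, 728, 729, 730, 731, 732, 733, 734, 735, 736]),
    ("11", [737, 738, 739, 740, 741, 742, 743, 744, 745, 746, 747, 748, 749, 750, 751, 752, 753, 754, 755, 756, 757, 758, 759, 760, 761]),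
    ("12", [762, 763, 764, 765, 766, 767, 768, 769, 770, 771, 772, 773, 774, 775, 776, 777, 778, 779, 780, 781, 782, 783, 784, 785, 786]),
    ("13", [787, 788, 789, 790, 791, 792, 793, 794, 795, 796, 797, 798, 799, 800, 801, 802, 803, 804, 805, 806, 807, 808, 809, 810]) ]

def get_gfreqgroop_for_bcch (bcch : Int) : Option String :=
  pvTable.foldl (fun ggroup kv => if bcch ∈ kv.2 then some kv.1 else ggroup) none

-- ===== PORT B =====
def get_gfreqgroop_for_bcch_alt (bcch : Int) : Option String :=
  if 128 ≤ bcch ∧ bcch ≤ 152 then some "1"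
  else if 787 ≤ bcch ∧ bcch ≤ 810 then some "13"
  else if 512 ≤ bcch ∧ bcch ≤ 786 then
    some (PySem.Int.toStr (PySem.Int.floordiv (bcch - 512) 25 + 2))
  else none

-- ===== PRECONDITION & SPEC =====
def Spec_get_gfreqgroop_for_bcch (bcch : Int) (out : Option String) : Prop := out = get_gfreqgroop_for_bcch_alt bcch
instance (bcch : Int) (out : Option String) : Decidable (Spec_get_gfreqgroop_for_bcch bcch out) := by unfold Spec_get_gfreqgroop_for_bcch; infer_instance

-- ===== CLAIM (what is proved, stated in full; the proofs are below) =====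
def Claim_equal_get_gfreqgroop_for_bcch : Prop := ∀ (bcch : Int), Dom_get_gfreqgroop_for_bcch bcch → Spec_get_gfreqgroop_for_bcch bcch (get_gfreqgroop_for_bcch bcch)

-- ===== LEMMAS AND PROOFS =====
set_option maxHeartbeats 1000000

lemma pvMemG1 (b : Int) : b ∈ ([128, 129, 130, 131, 132, 133, 134, 135, 136, 137, 138, 139, 140, 141, 142, 143, 144, 145, 146, 147, 148, 149, 150, 151, 152] : List Int) ↔ (128 ≤ b ∧ b ≤ 152) := by
  simp only [List.mem_cons, List.not_mem_nil, or_false]; omega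

lemma pvMemG2 (b : Int) : b ∈ ([512, 513, 514, 515, 516, 517, 518, 519, 520, 521, 522, 523, 524, 525, 526, 527, 528, 529, 530, 531, 532, 533, 534, 535, 536] : List Int) ↔ (512 ≤ b ∧ b ≤ 536) := by
  simp only [List.mem_cons, List.not_mem_nil, or_false]; omega

lemma pvMemG3 (b : Int) : b ∈ ([537, 538, 539, 540, 541, 542, 543, 544, 545, 546, 547, 548, 549, 550, 551, 552, 553, 554, 555, 556, 557, 558, 559, 560, 561] : List Int) ↔ (537 ≤ b ∧ b ≤ 561) := by
  simp only [List.mem_cons, List.not_mem_nil, or_false]; omega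

lemma pvMemG4 (b : Int) : b ∈ ([562, 563, 564, 565, 566, 567, 568, 569, 570, 571, 572, 573, 574, 575, 576, 577, 578, 579, 580, 581, 582, 583, 584, 585, 586] : List Int) ↔ (562 ≤ b ∧ b ≤ 586) := by
  simp only [List.mem_cons, List.not_mem_nil, or_false]; omega

lemma pvMemG5 (b : Int) : b ∈ ([587, 588, 589, 590, 591, 592, 593, 594, 595, 596, 597, 598, 599, 600, 601, 602, 603, 604, 605, 606, 607, 608, 609, 610, 611] : List Int) ↔ (587 ≤ b ∧ b ≤ 611) := by
  simp only [List.mem_cons, List.not_mem_nil, or_false]; omega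

lemma pvMemG6 (b : Int) : b ∈ ([612, 613, 614, 615, 616, 617, 618, 619, 620, 621, 622, 623, 624, 625, 626, 627, 628, 629, 630, 631, 632, 633, 634, 635, 636] : List Int) ↔ (612 ≤ b ∧ b ≤ 636) := by
  simp only [List.mem_cons, List.not_mem_nil, or_false]; omega

lemma pvMemG7 (b : Int) : b ∈ ([637, 638, 639, 640, 641, 642, 643, 644, 645, 646, 647, 648, 649, 650, 651, 652, 653, 654, 655, 656, 657, 658, 659, 660, 661] : List Int) ↔ (637 ≤ b ∧ b ≤ 661) := by
  simp only [List.mem_cons, List.not_mem_nil, or_false]; omega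

lemma pvMemG8 (b : Int) : b ∈ ([662, 663, 664, 665, 666, 667, 668, 669, 670, 671, 672, 673, 674, 675, 676, 677, 678, 679, 680, 681, 682, 683, 684, 685, 686] : List Int) ↔ (662 ≤ b ∧ b ≤ 686) := by
  simp only [List.mem_cons, List.not_mem_nil, or_false]; omega

lemma pvMemG9 (b : Int) : b ∈ ([687, 688, 689, 690, 691, 692, 693, 694, 695, 696, 697, 698, 699, 700, 701, 702, 703, 704, 705, 706, 707, 708, 709, 710, 711] : List Int) ↔ (687 ≤ b ∧ b ≤ 711) := by
  simp only [List.mem_cons, List.not_mem_nil, or_false]; omega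

lemma pvMemG10 (b : Int) : b ∈ ([712, 713, 714, 715, 716, 717, 718, 719, 720, 721, 722, 723, 724, 725, 726, 727, 728, 729, 730, 731, 732, 733, 734, 735, 736] : List Int) ↔ (712 ≤ b ∧ b ≤ 736) := by
  simp only [List.mem_cons, List.not_mem_nil, or_false]; omega

lemma pvMemG11 (b : Int) : b ∈ ([737, 738, 739, 740, 741, 742, 743, 744, 745, 746, 747, 748, 749, 750, 751, 752, 753, 754, 755, 756, 757, 758, 759, 760, 761] : List Int) ↔ (737 ≤ b ∧ b ≤ 761) := by
  simp only [List.mem_cons, List.not_mem_nil, or_false]; omega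

lemma pvMemG12 (b : Int) : b ∈ ([762, 763, 764, 765, 766, 767, 768, 769, 770, 771, 772, 773, 774, 775, 776, 777, 778, 779, 780, 781, 782, 783, 784, 785, 786] : List Int) ↔ (762 ≤ b ∧ b ≤ 786) := by
  simp only [List.mem_cons, List.not_mem_nil, or_false]; omega

lemma pvMemG13 (b : Int) : b ∈ ([787, 788, 789, 790, 791, 792, 793, 794, 795, 796, 797, 798, 799, 800, 801, 802, 803, 804, 805, 806, 807, 808, 809, 810] : List Int) ↔ (787 ≤ b ∧ b ≤ 810) := by
  simp only [List.mem_cons, List.not_mem_nil, or_false]; omega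

lemma pvMain (b : Int) : get_gfreqgroop_for_bcch b = get_gfreqgroop_for_bcch_alt b := by
  unfold get_gfreqgroop_for_bcch get_gfreqgroop_for_bcch_alt
  simp only [pvTable, List.foldl_cons, List.foldl_nil,
    pvMemG1, pvMemG2, pvMemG3, pvMemG4, pvMemG5, pvMemG6, pvMemG7, pvMemG8, pvMemG9,
    pvMemG10, pvMemG11, pvMemG12, pvMemG13]
  by_cases h : 128 ≤ b ∧ b ≤ 810
  · obtain ⟨h1, h2⟩ := h
    interval_cases b <;> decide
  · rw [not_and_or] at h
    rw [if_neg (show ¬((787:Int) ≤ b ∧ b ≤ 810) by omega)]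
    rw [if_neg (show ¬((762:Int) ≤ b ∧ b ≤ 786) by omega)]
    rw [if_neg (show ¬((737:Int) ≤ b ∧ b ≤ 761) by omega)]
    rw [if_neg (show ¬((712:Int) ≤ b ∧ b ≤ 736) by omega)]
    rw [if_neg (show ¬((687:Int) ≤ b ∧ b ≤ 711) by omega)]
    rw [if_neg (show ¬((662:Int) ≤ b ∧ b ≤ 686) by omega)]
    rw [if_neg (show ¬((637:Int) ≤ b ∧ b ≤ 661) by omega)]
    rw [if_neg (show ¬((612:Int) ≤ b ∧ b ≤ 636) by omega)]
    rw [if_neg (show ¬((587:Int) ≤ b ∧ b ≤ 611) by omega)]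
    rw [if_neg (show ¬((562:Int) ≤ b ∧ b ≤ 586) by omega)]
    rw [if_neg (show ¬((537:Int) ≤ b ∧ b ≤ 561) by omega)]
    rw [if_neg (show ¬((512:Int) ≤ b ∧ b ≤ 536) by omega)]
    rw [if_neg (show ¬((128:Int) ≤ b ∧ b ≤ 152) by omega)]
    rw [if_neg (show ¬((128:Int) ≤ b ∧ b ≤ 152) by omega)]
    rw [if_neg (show ¬((787:Int) ≤ b ∧ b ≤ 810) by omega)]
    rw [if_neg (show ¬((512:Int) ≤ b ∧ b ≤ 786) by omega)]

-- ===== VERDICT (by name: the statement is the Claim_ definition above) =====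
theorem get_gfreqgroop_for_bcch_spec : Claim_equal_get_gfreqgroop_for_bcch := by
  intro b _
  unfold Spec_get_gfreqgroop_for_bcch
  exact pvMain b
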